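-- pv_equiv track=rewrite | github.com/SausageTaste/Marumaru-Helper | codes/marumaru_helper_v3.py | split_command
-- ===== SOURCE A (Python) =====
-- class WTF(Exception):
--     def __init__(self, text:str=''):
--         self.text = ''
--         self.list = []
--
--         if isinstance(text, list):
--             self.list = text
--         else:
--             self.text = str(text)
--
--     def __str__(self):
--         if self.text:
--             return self.text
--         elif self.list:
--             string = ''
--             for x_s in self.list:
--                 string += "{}\n".format(x_s)
--             return string
--         else:
--             return "wtf??"
--
-- def split_command(command_line:str) -> list:
--     command_l = command_line.split(' ')
--
--     final_l = []
--     working_bock_b = False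
--     a_block_l = []
--     for x_s in command_l:
--         if working_bock_b:
--             a_block_l.append(x_s)
--             if x_s.endswith('"'):
--                 final_l.append(' '.join(a_block_l).strip('"'))
--                 a_block_l = []
--                 working_bock_b = False
--         else:
--             if x_s.startswith('"'):
--                 working_bock_b = True
--                 a_block_l.append(x_s)
--                 if x_s.endswith('"'):
--                     final_l.append(' '.join(a_block_l).strip('"'))
--                     a_block_l = []
--                     working_bock_b = False
--             else:
--                 final_l.append(x_s)
--     if working_bock_b:
--         raise WTF
--
--     return final_l
-- ===== SOURCE B (Python) =====
-- class WTF(Exception):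
--     pass
--
--
-- def split_command(command_line: str) -> list:
--     tokens = command_line.split(' ')
--     final_l = []
--     i = 0
--     n = len(tokens)
--     while i < n:
--         if tokens[i].startswith('"'):
--             j = i
--             while not tokens[j].endswith('"'):
--                 j += 1
--                 if j == n:
--                     raise WTF
--             final_l.append(' '.join(tokens[i:j + 1]).strip('"'))
--             i = j + 1
--         else:
--             final_l.append(tokens[i])
--             i += 1
--     return final_l
-- ===== Notes on version B (the rewrite author's own statement) =====
-- stated objective: alternative
-- what changed: Replaces A's persistent boolean-flag state machine (carrying working_bock_b and an accumulating a_block_l across the single for-loop) with an index-driven outer loop that, on seeing a token starting with '"', runs an inner forward scan consuming the whole quoted group at once and jumps past it.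
import Mathlib
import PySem

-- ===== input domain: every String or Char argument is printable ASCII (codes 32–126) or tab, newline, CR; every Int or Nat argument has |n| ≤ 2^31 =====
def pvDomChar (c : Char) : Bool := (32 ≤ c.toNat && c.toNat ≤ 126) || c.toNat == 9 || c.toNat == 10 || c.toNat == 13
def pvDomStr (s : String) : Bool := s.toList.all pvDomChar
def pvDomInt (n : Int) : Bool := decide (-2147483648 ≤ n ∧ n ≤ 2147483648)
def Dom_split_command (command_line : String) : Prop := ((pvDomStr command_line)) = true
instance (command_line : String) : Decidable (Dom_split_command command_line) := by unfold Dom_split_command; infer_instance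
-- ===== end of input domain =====

-- B replaces A's persistent boolean-flag state machine by an index-free outer recursion over the
-- space-split tokens with an inner forward scan (scanClose) that consumes a whole quoted group at once
-- (objective: alternative decomposition, same linear cost).

-- ===== PORT A =====
-- one iteration of A's for-loop over the state (final_l, working_bock_b, a_block_l)
def aStep (st : List String × Bool × List String) (x_s : String) :
    List String × Bool × List String :=
  match st with
  | (final_l, working, a_block) =>
    if working then
      let a_block' := a_block ++ [x_s]
      if PySem.Str.endswith x_s "\"" then
        (final_l ++ [PySem.Str.stripChars (PySem.Str.join " " a_block') "\""], false, [])
      else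
        (final_l, true, a_block')
    else
      if PySem.Str.startswith x_s "\"" then
        if PySem.Str.endswith x_s "\"" then
          (final_l ++ [PySem.Str.stripChars (PySem.Str.join " " [x_s]) "\""], false, [])
        else
          (final_l, true, [x_s])
      else
        (final_l ++ [x_s], false, [])

def split_command (command_line : String) : List String :=
  let command_l := (PySem.Str.split? command_line " ").getD []
  (command_l.foldl aStep ([], false, [])).1

-- ===== PORT B =====
-- B's inner while-loop: scan forward to the first token ending with '"';
-- returns (the consumed group, the remaining tokens); none = the scan ran off the end (Python B: raise WTF)
def scanClose : List String → Option (List String × List String)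
  | [] => none
  | t :: rest =>
    if PySem.Str.endswith t "\"" then some ([t], rest)
    else
      match scanClose rest with
      | none => none
      | some (g, r) => some (t :: g, r)

-- termination measure for altGo (the port cites it in decreasing_by)
theorem scanClose_length : ∀ {l g r : List String}, scanClose l = some (g, r) → r.length < l.length := by
  intro l
  induction l with
  | nil => intro g r h; simp [scanClose] at h
  | cons t rest ih =>
    intro g r h
    simp only [scanClose] at h
    split at h
    · simp at h
      obtain ⟨h1, h2⟩ := h
      subst h2
      simp
    · split at h
      · simp at h
      · next g' r' heq =>
        simp at h
        obtain ⟨h1, h2⟩ := h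
        subst h2
        have := ih heq
        simp
        omega

-- B's outer while-loop over the token list
def altGo : List String → List String
  | [] => []
  | t :: rest =>
    if PySem.Str.startswith t "\"" then
      match h : scanClose (t :: rest) with
      | none => []   -- unreachable under Pre_ (Python B raises WTF here)
      | some (g, r) => PySem.Str.stripChars (PySem.Str.join " " g) "\"" :: altGo r
    else
      t :: altGo rest
termination_by l => l.length
decreasing_by
  · exact scanClose_length h
  · simp

def split_command_alt (command_line : String) : List String :=
  altGo ((PySem.Str.split? command_line " ").getD [])

-- ===== PRECONDITION & SPEC =====
-- Pre_ excludes exactly the inputs on which A raises WTF: a token opening a quoted block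
-- (starts with '"', does not end with '"') with no later token ending with '"'. B raises WTF there too.
def Pre_split_command (command_line : String) : Prop :=
  let tokens := (PySem.Str.split? command_line " ").getD []
  ∀ i < tokens.length,
    (PySem.Str.startswith tokens[i]! "\"" = true ∧ PySem.Str.endswith tokens[i]! "\"" = false) →
    ∃ j < tokens.length, i < j ∧ PySem.Str.endswith tokens[j]! "\"" = true

instance (command_line : String) : Decidable (Pre_split_command command_line) := by
  unfold Pre_split_command; infer_instance

def pvWitness_split_command : String := "run \"my file.txt\" now"

def Spec_split_command (command_line : String) (out : List String) : Prop := out = split_command_alt command_line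
instance (command_line : String) (out : List String) : Decidable (Spec_split_command command_line out) := by unfold Spec_split_command; infer_instance

-- ===== CLAIM (what is proved, stated in full; the proofs are below) =====
def Claim_equal_split_command : Prop := ∀ (command_line : String), Dom_split_command command_line → Pre_split_command command_line → Spec_split_command command_line (split_command command_line)

-- ===== LEMMAS AND PROOFS =====

-- every opener token (starts with '"', does not end with '"') has a later closer; list-split form of Pre_
def GoodL (l : List String) : Prop :=
  ∀ l₁ t l₂, l = l₁ ++ t :: l₂ →
    PySem.Chars.startswith t.toList ['\"'] = true → PySem.Chars.endswith t.toList ['\"'] = false →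
    ∃ u ∈ l₂, PySem.Chars.endswith u.toList ['\"'] = true

theorem goodL_cons {t : String} {rest : List String} (h : GoodL (t :: rest)) : GoodL rest := by
  intro l₁ u l₂ e hs he
  exact h (t :: l₁) u l₂ (by simp [e]) hs he

theorem goodL_append_right {g r : List String} (h : GoodL (g ++ r)) : GoodL r := by
  induction g with
  | nil => exact h
  | cons a g ih => exact ih (goodL_cons h)

theorem scanClose_decomp : ∀ {l g r : List String}, scanClose l = some (g, r) → l = g ++ r := by
  intro l
  induction l with
  | nil => intro g r h; simp [scanClose] at h
  | cons t rest ih =>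
    intro g r h
    simp only [scanClose] at h
    split at h
    · simp at h
      simp [← h.1, ← h.2]
    · split at h
      · simp at h
      · next g' r' heq =>
        simp at h
        have := ih heq
        simp [← h.1, ← h.2, this]

theorem scanClose_cons_close {t : String} {rest : List String}
    (he : PySem.Chars.endswith t.toList ['\"'] = true) :
    scanClose (t :: rest) = some ([t], rest) := by
  simp [scanClose, he]

theorem scanClose_cons_open {t : String} {rest : List String} {g r : List String}
    (he : PySem.Chars.endswith t.toList ['\"'] = false)
    (heq : scanClose rest = some (g, r)) :
    scanClose (t :: rest) = some (t :: g, r) := by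
  simp [scanClose, he, heq]

theorem scanClose_some_of_exists : ∀ {l : List String},
    (∃ u ∈ l, PySem.Chars.endswith u.toList ['\"'] = true) → ∃ g r, scanClose l = some (g, r) := by
  intro l
  induction l with
  | nil => intro h; simp at h
  | cons t rest ih =>
    intro h
    by_cases he : PySem.Chars.endswith t.toList ['\"'] = true
    · exact ⟨[t], rest, scanClose_cons_close he⟩
    · rw [Bool.not_eq_true] at he
      obtain ⟨u, hu, hue⟩ := h
      rcases List.mem_cons.mp hu with rfl | hu'
      · rw [hue] at he; exact absurd he (by simp)
      · obtain ⟨g, r, hgr⟩ := ih ⟨u, hu', hue⟩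
        exact ⟨t :: g, r, scanClose_cons_open he hgr⟩

-- reduction lemmas for one step of A's loop
theorem aStep_working {f b : List String} {t : String}
    (he : PySem.Chars.endswith t.toList ['\"'] = true) :
    aStep (f, true, b) t =
      (f ++ [PySem.Str.stripChars (PySem.Str.join " " (b ++ [t])) "\""], false, []) := by
  simp [aStep, he]

theorem aStep_working_open {f b : List String} {t : String}
    (he : PySem.Chars.endswith t.toList ['\"'] = false) :
    aStep (f, true, b) t = (f, true, b ++ [t]) := by
  simp [aStep, he]

theorem aStep_out_close {f : List String} {t : String}
    (hs : PySem.Chars.startswith t.toList ['\"'] = true)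
    (he : PySem.Chars.endswith t.toList ['\"'] = true) :
    aStep (f, false, []) t =
      (f ++ [PySem.Str.stripChars (PySem.Str.join " " [t]) "\""], false, []) := by
  simp [aStep, hs, he]

theorem aStep_out_open {f : List String} {t : String}
    (hs : PySem.Chars.startswith t.toList ['\"'] = true)
    (he : PySem.Chars.endswith t.toList ['\"'] = false) :
    aStep (f, false, []) t = (f, true, [t]) := by
  simp [aStep, hs, he]

theorem aStep_out_plain {f : List String} {t : String}
    (hs : PySem.Chars.startswith t.toList ['\"'] = false) :
    aStep (f, false, []) t = (f ++ [t], false, []) := by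
  simp [aStep, hs]

-- reduction lemmas for B's altGo
theorem altGo_plain {t : String} {rest : List String}
    (hs : PySem.Chars.startswith t.toList ['\"'] = false) :
    altGo (t :: rest) = t :: altGo rest := by
  rw [altGo]
  simp [hs]

theorem altGo_group {t : String} {rest g r : List String}
    (hs : PySem.Chars.startswith t.toList ['\"'] = true)
    (hscan : scanClose (t :: rest) = some (g, r)) :
    altGo (t :: rest) = PySem.Str.stripChars (PySem.Str.join " " g) "\"" :: altGo r := by
  rw [altGo, if_pos (show PySem.Str.startswith t "\"" = true by simpa using hs)]
  split
  · next heq => rw [hscan] at heq; simp at heq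
  · next g' r' heq =>
    rw [hscan] at heq
    simp at heq
    obtain ⟨h1, h2⟩ := heq
    subst h1
    subst h2
    rfl

-- A's working-block phase consumes exactly the group scanClose finds
theorem foldl_working : ∀ (l g r : List String), scanClose l = some (g, r) →
    ∀ (f b : List String),
    List.foldl aStep (f, true, b) l =
      List.foldl aStep (f ++ [PySem.Str.stripChars (PySem.Str.join " " (b ++ g)) "\""], false, []) r := by
  intro l
  induction l with
  | nil => intro g r h; simp [scanClose] at h
  | cons t rest ih =>
    intro g r h f b
    simp only [scanClose] at h
    split at h
    · next he =>
      simp at h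
      obtain ⟨rfl, rfl⟩ := h
      rw [List.foldl_cons, aStep_working (by simpa using he)]
    · next he =>
      split at h
      · simp at h
      · next g' r' heq =>
        simp at h
        obtain ⟨h1, h2⟩ := h
        subst h1
        subst h2
        rw [List.foldl_cons, aStep_working_open (by simpa using he), ih g' _ heq f (b ++ [t])]
        simp

-- main loop correspondence: A's fold from the outside state equals f ++ B's altGo
theorem foldl_eq_altGo : ∀ (n : Nat) (l : List String), l.length ≤ n → GoodL l →
    ∀ f, (List.foldl aStep (f, false, []) l).1 = f ++ altGo l := by
  intro n
  induction n with
  | zero =>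
    intro l hl _ f
    have : l = [] := List.eq_nil_of_length_eq_zero (Nat.le_zero.mp hl)
    simp [this, altGo]
  | succ n ih =>
    intro l hl hg f
    match l with
    | [] => simp [altGo]
    | t :: rest =>
      by_cases hs : PySem.Chars.startswith t.toList ['\"'] = true
      · by_cases he : PySem.Chars.endswith t.toList ['\"'] = true
        · rw [List.foldl_cons, aStep_out_close hs he,
            ih rest (by simp at hl; omega) (goodL_cons hg) _,
            altGo_group hs (scanClose_cons_close he)]
          simp
        · rw [Bool.not_eq_true] at he
          have hex : ∃ u ∈ rest, PySem.Chars.endswith u.toList ['\"'] = true :=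
            hg [] t rest (by simp) hs he
          obtain ⟨g', r', heq⟩ := scanClose_some_of_exists hex
          have hgr : GoodL r' := by
            have := scanClose_decomp heq
            exact goodL_append_right (this ▸ goodL_cons hg)
          rw [List.foldl_cons, aStep_out_open hs he, foldl_working rest g' r' heq f [t],
            ih r' (by have := scanClose_length heq; simp at hl; omega) hgr _,
            altGo_group hs (scanClose_cons_open he heq)]
          simp
      · rw [Bool.not_eq_true] at hs
        rw [List.foldl_cons, aStep_out_plain hs, ih rest (by simp at hl; omega) (goodL_cons hg) _,
          altGo_plain hs]
        simp
-- the indexed condition implies the list-split form, over an arbitrary token list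
theorem idx_goodL : ∀ (tokens : List String),
    (∀ i < tokens.length,
      (PySem.Str.startswith tokens[i]! "\"" = true ∧
       PySem.Str.endswith tokens[i]! "\"" = false) →
      ∃ j < tokens.length, i < j ∧ PySem.Str.endswith tokens[j]! "\"" = true) →
    GoodL tokens := by
  intro tokens h l₁ t l₂ e hs he
  subst e
  have hi : l₁.length < (l₁ ++ t :: l₂).length := by simp
  have hgt : (l₁ ++ t :: l₂)[l₁.length]! = t := by
    rw [getElem!_pos _ l₁.length hi, List.getElem_append_right (by omega)]
    simp
  obtain ⟨j, hj, hij, hje⟩ :=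
    h l₁.length hi (by rw [hgt]; exact ⟨by simpa using hs, by simpa using he⟩)
  have hjlen : j - l₁.length - 1 < l₂.length := by
    simp at hj; omega
  refine ⟨l₂[j - l₁.length - 1], List.getElem_mem _, ?_⟩
  have hjel : (l₁ ++ t :: l₂)[j]! = l₂[j - l₁.length - 1] := by
    rw [getElem!_pos _ j hj, List.getElem_append_right (by omega)]
    have h2 : j - l₁.length ≠ 0 := by omega
    rcases Nat.exists_eq_succ_of_ne_zero h2 with ⟨k, hk⟩
    simp [hk]
  rw [← hjel]
  simpa using hje

theorem pre_goodL {cl : String} (h : Pre_split_command cl) :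
    GoodL ((PySem.Str.split? cl " ").getD []) := by
  unfold Pre_split_command at h
  exact idx_goodL _ h

-- ===== VERDICT (by name: the statement is the Claim_ definition above) =====
theorem split_command_spec : Claim_equal_split_command := by
  intro cl _ hpre
  unfold Spec_split_command split_command split_command_alt
  exact foldl_eq_altGo ((PySem.Str.split? cl " ").getD []).length _ le_rfl (pre_goodL hpre) []
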